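-- pv_equiv track=rewrite | github.com/Pet3r1512/Leetcode | #3033.ModifytheMatrix/3033.py | modifiedMatrix
-- ===== SOURCE A (Python) =====
-- from typing import List
--
-- def modifiedMatrix(matrix: List[List[int]]) -> List[List[int]]:
--     # idea:
--     # Step 1: Rotate the matrix 90 degree clockwise
--     # Step 2: Calculate and replace values
--     # Step 3: Rotate the matrix 90 degree anti-clockwise
--
--     rows = len(matrix)
--     cols = len(matrix[0]) if rows > 0 else 0
--
--     rotated = [[0] * rows for _ in range(cols)]
--
--     for i in range(rows):
--         for j in range(cols):
--             rotated[j][rows - i - 1] = matrix[i][j]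
--
--     for i in range(len(rotated)):
--         max_value = max([val for val in rotated[i] if val != -1], default=0)
--         for j in range(len(rotated[i])):
--             if rotated[i][j] == -1:
--                 rotated[i][j] = max_value
--
--     restored = [[0] * cols for _ in range(rows)]
--
--     for i in range(cols):
--         for j in range(rows):
--             restored[rows - j - 1][i] = rotated[i][j]
--
--     return restored
-- ===== SOURCE B (Python) =====
-- from typing import List
--
-- def modifiedMatrix(matrix: List[List[int]]) -> List[List[int]]:
--     # One pass over columns to collect each column's max over entries != -1
--     # (0 when the column is all -1), then one comprehension building the result.
--     cols = len(matrix[0]) if matrix else 0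
--     col_max = [max((row[j] for row in matrix if row[j] != -1), default=0)
--                for j in range(cols)]
--     return [[col_max[j] if row[j] == -1 else row[j] for j in range(cols)]
--             for row in matrix]
-- ===== Notes on version B (the rewrite author's own statement) =====
-- stated objective: simpler
-- what changed: Drops both rotation passes and the in-place mutation: B computes per-column maxima directly and builds the result in one comprehension.
import Mathlib
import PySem

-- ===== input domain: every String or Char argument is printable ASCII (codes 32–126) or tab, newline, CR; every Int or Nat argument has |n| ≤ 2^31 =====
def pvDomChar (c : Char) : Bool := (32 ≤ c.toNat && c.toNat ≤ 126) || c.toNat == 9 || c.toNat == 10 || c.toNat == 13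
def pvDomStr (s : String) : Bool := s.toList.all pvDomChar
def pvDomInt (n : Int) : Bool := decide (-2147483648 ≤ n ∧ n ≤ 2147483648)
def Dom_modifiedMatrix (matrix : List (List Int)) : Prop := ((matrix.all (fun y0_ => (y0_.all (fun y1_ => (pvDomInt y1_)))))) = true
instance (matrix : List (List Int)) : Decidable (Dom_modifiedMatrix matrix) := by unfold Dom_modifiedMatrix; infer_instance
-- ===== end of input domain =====

-- B replaces A's rotate/mutate/rotate-back passes by direct per-column maxima and a fresh
-- comprehension (simpler decomposition, same value; A does not mutate its argument either).


-- ===== PORT A =====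
-- `m[r][c] = v`: Python's indexed assignment (out-of-range writes never occur in A's loops)
def pvSet2 (m : List (List Int)) (r c : Nat) (v : Int) : List (List Int) :=
  m.modify r (fun row => row.set c v)

-- body of `for j in range(cols): rotated[j][rows - i - 1] = matrix[i][j]`
def pvPass1Step (matrix : List (List Int)) (rot : List (List Int)) (i : Nat) : List (List Int) :=
  (List.range (if matrix.length > 0 then (matrix.headD []).length else 0)).foldl
    (fun rot j => pvSet2 rot j (matrix.length - i - 1) ((matrix.getD i []).getD j 0)) rot

-- body of the replacement loop: `max_value = max([...], default=0); for j in range(len(rotated[i])): ...`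
def pvPass2Step (rot : List (List Int)) (i : Nat) : List (List Int) :=
  let maxv := PySem.List.maxD ((rot.getD i []).filter (fun v => v ≠ -1)) (fun x => x) 0
  (List.range (rot.getD i []).length).foldl
    (fun rot j => if (rot.getD i []).getD j 0 = -1 then pvSet2 rot i j maxv else rot) rot

-- body of `for j in range(rows): restored[rows - j - 1][i] = rotated[i][j]`
def pvPass3Step (rows : Nat) (rotated : List (List Int)) (res : List (List Int)) (i : Nat) : List (List Int) :=
  (List.range rows).foldl
    (fun res j => pvSet2 res (rows - j - 1) i ((rotated.getD i []).getD j 0)) res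

def modifiedMatrix (matrix : List (List Int)) : List (List Int) :=
  let rows := matrix.length
  let cols := if rows > 0 then (matrix.headD []).length else 0
  let rotated0 := (List.range cols).map (fun _ => List.replicate rows 0)
  let rotated1 := (List.range rows).foldl (pvPass1Step matrix) rotated0
  let rotated2 := (List.range rotated1.length).foldl pvPass2Step rotated1
  let restored0 := (List.range rows).map (fun _ => List.replicate cols 0)
  (List.range cols).foldl (pvPass3Step rows rotated2) restored0

-- ===== PORT B =====
def modifiedMatrix_alt (matrix : List (List Int)) : List (List Int) :=
  let cols := if matrix = [] then 0 else (matrix.headD []).length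
  let colMax := (List.range cols).map (fun j =>
      PySem.List.maxD (((matrix.map (fun row => row.getD j 0)).filter (fun v => v ≠ -1)))
        (fun x => x) 0)
  matrix.map (fun row => (List.range cols).map (fun j =>
      if row.getD j 0 = -1 then colMax.getD j 0 else row.getD j 0))

-- ===== PRECONDITION & SPEC =====
-- Pre_ excludes exactly the inputs where BOTH Pythons raise IndexError: a row shorter than the
-- first row (both index every row at columns 0..len(matrix[0])-1). The Lean ports read missing
-- cells with a default and happen to agree even there, so the proof below does not need Pre_;
-- it is stated because the Pythons return nothing on those inputs.
def Pre_modifiedMatrix (matrix : List (List Int)) : Prop :=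
  ∀ row ∈ matrix, (matrix.headD []).length ≤ row.length
instance (matrix : List (List Int)) : Decidable (Pre_modifiedMatrix matrix) := by
  unfold Pre_modifiedMatrix; infer_instance

def pvWitness_modifiedMatrix : List (List Int) := [[1, -1], [-1, 2], [3, 4]]

def Spec_modifiedMatrix (matrix : List (List Int)) (out : List (List Int)) : Prop := out = modifiedMatrix_alt matrix
instance (matrix : List (List Int)) (out : List (List Int)) : Decidable (Spec_modifiedMatrix matrix out) := by unfold Spec_modifiedMatrix; infer_instance

-- ===== CLAIM (what is proved, stated in full; the proofs are below) =====
def Claim_equal_modifiedMatrix : Prop := ∀ (matrix : List (List Int)), Dom_modifiedMatrix matrix → Pre_modifiedMatrix matrix → Spec_modifiedMatrix matrix (modifiedMatrix matrix)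

-- ===== LEMMAS AND PROOFS =====

-- matrix[i][j] read with defaults, as both ports read it
def pvVal (matrix : List (List Int)) (i j : Nat) : Int := (matrix.getD i []).getD j 0

theorem pvSet2_getD (m : List (List Int)) (r c : Nat) (v : Int) (r' : Nat) :
    (pvSet2 m r c v).getD r' [] = if r' = r then (m.getD r' []).set c v else m.getD r' [] := by
  simp only [pvSet2, List.getD_eq_getElem?_getD, List.getElem?_modify]
  by_cases hr : r' = r
  · subst hr
    rcases m[r']? with _ | row <;> simp
  · have hr2 : ¬ r = r' := fun e => hr e.symm
    rcases m[r']? with _ | row <;> simp [hr, hr2]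

theorem pvSetD_getD (l : List Int) (c : Nat) (v : Int) (c' : Nat) :
    (l.set c v).getD c' 0 = if c' = c ∧ c < l.length then v else l.getD c' 0 := by
  simp only [List.getD_eq_getElem?_getD, List.getElem?_set]
  split_ifs <;> simp_all

-- ----- pass 1 (build `rotated`) -----

theorem pvInner1 (f : Nat → Int) (p n : Nat) (rot : List (List Int)) (r : Nat) :
    (((List.range n).foldl (fun rot j => pvSet2 rot j p (f j)) rot)).getD r [] =
      if r < n then (rot.getD r []).set p (f r) else rot.getD r [] := by
  induction n with
  | zero => rw [List.range_zero, List.foldl_nil, if_neg (by omega)]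
  | succ n ih =>
    rw [List.range_succ, List.foldl_append, List.foldl_cons, List.foldl_nil, pvSet2_getD]
    by_cases hr : r = n
    · subst hr
      rw [if_pos rfl, ih, if_neg (by omega), if_pos (by omega)]
    · rw [if_neg hr, ih]
      by_cases h1 : r < n
      · rw [if_pos h1, if_pos (by omega)]
      · rw [if_neg h1, if_neg (by omega)]

theorem pvOuter1 (matrix : List (List Int)) (cols : Nat)
    (hcols : cols = (if matrix.length > 0 then (matrix.headD []).length else 0))
    (m : Nat) (hm : m ≤ matrix.length) (j : Nat) :
    (((List.range m).foldl (pvPass1Step matrix)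
      ((List.range cols).map (fun _ => List.replicate matrix.length 0)))).getD j [] =
      if j < cols then
        (List.range matrix.length).map
          (fun k => if matrix.length - m ≤ k then pvVal matrix (matrix.length - 1 - k) j else 0)
      else [] := by
  induction m with
  | zero =>
    rw [List.range_zero, List.foldl_nil]
    by_cases hj : j < cols
    · rw [if_pos hj, List.getD_eq_getElem _ _ (by simpa using hj)]
      simp only [List.getElem_map]
      apply List.ext_getElem (by simp)
      intro i h1 h2
      simp only [List.getElem_map, List.getElem_range, List.getElem_replicate]
      rw [if_neg (by simp only [List.length_replicate] at h1; omega)]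
    · rw [if_neg hj, List.getD_eq_default _ _ (by simp; omega)]
  | succ m ih =>
    rw [List.range_succ, List.foldl_append, List.foldl_cons, List.foldl_nil,
        pvPass1Step, ← hcols, pvInner1]
    by_cases hj : j < cols
    · rw [if_pos hj, ih (by omega), if_pos hj, if_pos hj]
      apply List.ext_getElem (by simp)
      intro k h1 h2
      simp only [List.length_set, List.length_map, List.length_range] at h1
      rw [List.getElem_set]
      by_cases hk : matrix.length - m - 1 = k
      · rw [if_pos hk]
        simp only [List.getElem_map, List.getElem_range]
        rw [if_pos (by omega)]
        have hh : matrix.length - 1 - k = m := by omega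
        rw [hh]
        rfl
      · rw [if_neg hk]
        simp only [List.getElem_map, List.getElem_range]
        by_cases h3 : matrix.length - m ≤ k
        · rw [if_pos h3, if_pos (by omega)]
        · rw [if_neg h3, if_neg (by omega)]
    · rw [if_neg hj, if_neg hj, ih (by omega), if_neg hj]

-- ----- pass 2 (replace the -1 entries) -----

theorem pvInner2 (i : Nat) (mv : Int) (n : Nat) (rot : List (List Int)) :
    (∀ r, r ≠ i →
      (((List.range n).foldl (fun rot j =>
          if (rot.getD i []).getD j 0 = -1 then pvSet2 rot i j mv else rot) rot)).getD r []
        = rot.getD r []) ∧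
    ((((List.range n).foldl (fun rot j =>
        if (rot.getD i []).getD j 0 = -1 then pvSet2 rot i j mv else rot) rot)).getD i []).length
      = (rot.getD i []).length ∧
    (∀ c, ((((List.range n).foldl (fun rot j =>
        if (rot.getD i []).getD j 0 = -1 then pvSet2 rot i j mv else rot) rot)).getD i []).getD c 0
      = if c < n ∧ (rot.getD i []).getD c 0 = -1 then mv else (rot.getD i []).getD c 0) := by
  induction n with
  | zero =>
    refine ⟨fun r _ => rfl, rfl, fun c => ?_⟩
    rw [List.range_zero, List.foldl_nil, if_neg (by omega)]
  | succ n ih =>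
    obtain ⟨ihr, ihl, ihc⟩ := ih
    rw [List.range_succ, List.foldl_append, List.foldl_cons, List.foldl_nil]
    have hcur : ((((List.range n).foldl (fun rot j =>
        if (rot.getD i []).getD j 0 = -1 then pvSet2 rot i j mv else rot) rot)).getD i []).getD n 0
        = (rot.getD i []).getD n 0 := by
      rw [ihc]; rw [if_neg (by omega)]
    rw [hcur]
    by_cases hn : (rot.getD i []).getD n 0 = -1
    · rw [if_pos hn]
      refine ⟨fun r hr => by rw [pvSet2_getD, if_neg hr, ihr r hr], ?_, ?_⟩
      · rw [pvSet2_getD, if_pos rfl, List.length_set, ihl]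
      · intro c
        rw [pvSet2_getD, if_pos rfl, pvSetD_getD, ihl]
        by_cases hc : c = n
        · subst hc
          have hlen : c < (rot.getD i []).length := by
            by_contra hcl
            rw [List.getD_eq_default _ _ (by omega)] at hn
            exact absurd hn (by norm_num)
          rw [if_pos ⟨rfl, hlen⟩, if_pos ⟨by omega, hn⟩]
        · rw [if_neg (by tauto), ihc]
          by_cases h1 : c < n ∧ (rot.getD i []).getD c 0 = -1
          · rw [if_pos h1, if_pos ⟨by omega, h1.2⟩]
          · rw [if_neg h1, if_neg (by
              intro h2
              obtain ⟨h2a, h2b⟩ := h2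
              exact h1 ⟨by omega, h2b⟩)]
    · rw [if_neg hn]
      refine ⟨ihr, ihl, fun c => ?_⟩
      rw [ihc]
      by_cases h1 : c < n ∧ (rot.getD i []).getD c 0 = -1
      · rw [if_pos h1, if_pos ⟨by omega, h1.2⟩]
      · rw [if_neg h1, if_neg (by
          intro h2
          obtain ⟨h2a, h2b⟩ := h2
          refine h1 ⟨?_, h2b⟩
          by_cases hc : c = n
          · exact absurd (hc ▸ h2b) hn
          · omega)]

theorem pvExtD (l1 l2 : List Int) (h : l1.length = l2.length)
    (he : ∀ c, c < l1.length → l1.getD c 0 = l2.getD c 0) : l1 = l2 := by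
  apply List.ext_getElem h
  intro c h1 h2
  rw [← List.getD_eq_getElem l1 0 h1, ← List.getD_eq_getElem l2 0 h2]
  exact he c h1

theorem pvPass2Step_eq (rot : List (List Int)) (i : Nat) :
    pvPass2Step rot i = (List.range (rot.getD i []).length).foldl
      (fun rot' j => if (rot'.getD i []).getD j 0 = -1 then
        pvSet2 rot' i j (PySem.List.maxD ((rot.getD i []).filter (fun v => v ≠ -1)) (fun x => x) 0)
      else rot') rot := rfl

theorem pvOuter2 (R1 : List (List Int)) (m : Nat) (r : Nat) :
    (((List.range m).foldl pvPass2Step R1)).getD r [] =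
      if r < m then
        (R1.getD r []).map (fun v =>
          if v = -1 then PySem.List.maxD ((R1.getD r []).filter (fun v => v ≠ -1)) (fun x => x) 0
          else v)
      else R1.getD r [] := by
  induction m generalizing r with
  | zero => rw [List.range_zero, List.foldl_nil, if_neg (by omega)]
  | succ m ih =>
    rw [List.range_succ, List.foldl_append, List.foldl_cons, List.foldl_nil, pvPass2Step_eq]
    have hrowm : (((List.range m).foldl pvPass2Step R1)).getD m [] = R1.getD m [] := by
      rw [ih, if_neg (by omega)]
    rw [hrowm]
    obtain ⟨h2r, h2l, h2c⟩ := pvInner2 m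
      (PySem.List.maxD ((R1.getD m []).filter (fun v => v ≠ -1)) (fun x => x) 0)
      ((R1.getD m []).length)
      ((List.range m).foldl pvPass2Step R1)
    by_cases hr : r = m
    · subst hr
      rw [if_pos (by omega)]
      apply pvExtD _ _ (by rw [h2l, hrowm]; simp)
      intro c hc1
      rw [h2c c, hrowm]
      have hclen : c < (R1.getD r []).length := by rw [h2l, hrowm] at hc1; exact hc1
      have hrhs : ((R1.getD r []).map (fun v =>
          if v = -1 then PySem.List.maxD ((R1.getD r []).filter (fun v => v ≠ -1)) (fun x => x) 0
          else v)).getD c 0 =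
          (if (R1.getD r []).getD c 0 = -1 then
            PySem.List.maxD ((R1.getD r []).filter (fun v => v ≠ -1)) (fun x => x) 0
          else (R1.getD r []).getD c 0) := by
        rw [List.getD_eq_getElem _ 0 (by simpa using hclen), List.getD_eq_getElem _ 0 hclen]
        simp
      rw [hrhs]
      by_cases hv : (R1.getD r []).getD c 0 = -1
      · rw [if_pos ⟨hclen, hv⟩, if_pos hv]
      · rw [if_neg (by tauto), if_neg hv]
    · rw [h2r r hr, ih]
      by_cases h1 : r < m
      · rw [if_pos h1, if_pos (by omega)]
      · rw [if_neg h1, if_neg (by omega)]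

-- ----- pass 3 (build `restored`) -----

theorem pvInner3 (rows i : Nat) (w : Nat → Int) (n : Nat) (hn : n ≤ rows)
    (res : List (List Int)) (r : Nat) :
    (((List.range n).foldl (fun res j => pvSet2 res (rows - j - 1) i (w j)) res)).getD r [] =
      if rows - n ≤ r ∧ r < rows then (res.getD r []).set i (w (rows - 1 - r))
      else res.getD r [] := by
  induction n with
  | zero => rw [List.range_zero, List.foldl_nil, if_neg (by omega)]
  | succ n ih =>
    rw [List.range_succ, List.foldl_append, List.foldl_cons, List.foldl_nil, pvSet2_getD,
        ih (by omega)]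
    by_cases hr : r = rows - n - 1
    · subst hr
      rw [if_pos rfl, if_neg (by omega), if_pos (by omega)]
      have hh : rows - 1 - (rows - n - 1) = n := by omega
      rw [hh]
    · rw [if_neg hr]
      by_cases h1 : rows - n ≤ r ∧ r < rows
      · rw [if_pos h1, if_pos (by omega)]
      · rw [if_neg h1, if_neg (by omega)]

theorem pvOuter3 (rows cols : Nat) (rotated : List (List Int)) (m : Nat) (hm : m ≤ cols) (r : Nat) :
    (((List.range m).foldl (pvPass3Step rows rotated)
      ((List.range rows).map (fun _ => List.replicate cols 0)))).getD r [] =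
      if r < rows then
        (List.range cols).map (fun c =>
          if c < m then (rotated.getD c []).getD (rows - 1 - r) 0 else 0)
      else [] := by
  induction m with
  | zero =>
    rw [List.range_zero, List.foldl_nil]
    by_cases hr : r < rows
    · rw [if_pos hr, List.getD_eq_getElem _ _ (by simpa using hr)]
      simp only [List.getElem_map]
      apply List.ext_getElem (by simp)
      intro c h1 h2
      simp only [List.getElem_map, List.getElem_range, List.getElem_replicate]
      rw [if_neg (by omega)]
    · rw [if_neg hr, List.getD_eq_default _ _ (by simp; omega)]
  | succ m ih =>
    rw [List.range_succ, List.foldl_append, List.foldl_cons, List.foldl_nil,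
        pvPass3Step, pvInner3 rows m _ rows (le_refl rows)]
    by_cases hr : r < rows
    · rw [if_pos ⟨by omega, hr⟩, ih (by omega), if_pos hr, if_pos hr]
      apply List.ext_getElem (by simp)
      intro c h1 h2
      simp only [List.length_set, List.length_map, List.length_range] at h1
      rw [List.getElem_set]
      by_cases hc : m = c
      · subst hc
        rw [if_pos rfl]
        simp only [List.getElem_map, List.getElem_range]
        rw [if_pos (by omega)]
      · rw [if_neg hc]
        simp only [List.getElem_map, List.getElem_range]
        by_cases h3 : c < m
        · rw [if_pos h3, if_pos (by omega)]
        · rw [if_neg h3, if_neg (by omega)]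
    · rw [if_neg (by omega), ih (by omega), if_neg hr, if_neg hr]

-- ----- the column max is insensitive to reversing the column -----

theorem pvMaxD_reverse (l : List Int) (d : Int) :
    PySem.List.maxD l.reverse (fun x => x) d = PySem.List.maxD l (fun x => x) d := by
  rcases hl : l with _ | ⟨x, t⟩
  · rfl
  · rw [← hl]
    have hne : l ≠ [] := by rw [hl]; exact List.cons_ne_nil x t
    rcases h1 : PySem.List.max? l (fun x => x) with _ | m1
    · exact absurd ((PySem.List.max?_eq_none_iff _ _).1 h1) hne
    rcases h2 : PySem.List.max? l.reverse (fun x => x) with _ | m2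
    · exact absurd (List.reverse_eq_nil_iff.1 ((PySem.List.max?_eq_none_iff _ _).1 h2)) hne
    have hm1 : m1 ∈ l := PySem.List.max?_mem h1
    have hm2 : m2 ∈ l := List.mem_reverse.1 (PySem.List.max?_mem h2)
    have e1 := PySem.List.max?_isMax h1 m2 hm2
    have e2 := PySem.List.max?_isMax h2 m1 (List.mem_reverse.2 hm1)
    simp only [PySem.List.maxD, h1, h2, Option.getD_some]
    omega

theorem pvSet2_length (m : List (List Int)) (r c : Nat) (v : Int) :
    (pvSet2 m r c v).length = m.length := by
  simp [pvSet2]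

theorem pvFoldl_length {β : Type} (g : List (List Int) → β → List (List Int))
    (h : ∀ m b, (g m b).length = m.length) (xs : List β) (m : List (List Int)) :
    (xs.foldl g m).length = m.length := by
  induction xs generalizing m with
  | nil => rfl
  | cons x t ih => rw [List.foldl_cons, ih, h]

theorem pvPass1Step_length (matrix m : List (List Int)) (i : Nat) :
    (pvPass1Step matrix m i).length = m.length := by
  unfold pvPass1Step
  exact pvFoldl_length _ (fun m b => pvSet2_length m b _ _) _ _

theorem pvPass3Step_length (rows : Nat) (rotated : List (List Int)) (m : List (List Int)) (i : Nat) :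
    (pvPass3Step rows rotated m i).length = m.length := by
  unfold pvPass3Step
  exact pvFoldl_length _ (fun m b => pvSet2_length m _ _ _) _ _

-- R1's row c is the reversed column c of the input
theorem pvRowRev (matrix : List (List Int)) (c : Nat) :
    (List.range matrix.length).map (fun k => pvVal matrix (matrix.length - 1 - k) c) =
      (matrix.map (fun row => row.getD c 0)).reverse := by
  apply List.ext_getElem (by simp)
  intro k h1 h2
  simp only [List.length_map, List.length_range] at h1
  simp only [List.getElem_map, List.getElem_range, List.getElem_reverse, List.length_map]
  rw [pvVal, List.getD_eq_getElem matrix [] (by omega)]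

theorem modifiedMatrix_eq_alt (matrix : List (List Int)) :
    modifiedMatrix matrix = modifiedMatrix_alt matrix := by
  have hca : (if matrix.length > 0 then (matrix.headD []).length else 0)
      = (matrix.headD []).length := by
    cases matrix <;> simp
  have hcb : (if matrix = [] then 0 else (matrix.headD []).length)
      = (matrix.headD []).length := by
    cases matrix <;> simp
  simp only [modifiedMatrix, modifiedMatrix_alt, hca, hcb]
  have hlen1 : ((List.range matrix.length).foldl (pvPass1Step matrix)
      ((List.range (matrix.headD []).length).map
        (fun _ => List.replicate matrix.length 0))).length = (matrix.headD []).length := by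
    rw [pvFoldl_length _ (fun m b => pvPass1Step_length matrix m b)]
    simp
  have hR1c : ∀ c, c < (matrix.headD []).length →
      ((List.range matrix.length).foldl (pvPass1Step matrix)
        ((List.range (matrix.headD []).length).map
          (fun _ => List.replicate matrix.length 0))).getD c [] =
        (List.range matrix.length).map (fun k => pvVal matrix (matrix.length - 1 - k) c) := by
    intro c hc
    rw [pvOuter1 matrix (matrix.headD []).length hca.symm matrix.length (le_refl _), if_pos hc]
    apply List.map_congr_left
    intro k hk
    rw [if_pos (by simp only [List.mem_range] at hk; omega)]
  apply List.ext_getElem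
  · rw [pvFoldl_length _ (fun m b => pvPass3Step_length _ _ m b)]
    simp
  intro r h1 h2
  have hr : r < matrix.length := by simpa using h2
  rw [← List.getD_eq_getElem _ [] h1, pvOuter3 _ _ _ _ (le_refl _), if_pos hr]
  simp only [List.getElem_map]
  apply List.ext_getElem (by simp)
  intro c hc1 hc2
  have hc : c < (matrix.headD []).length := by simpa using hc1
  simp only [List.getElem_map, List.getElem_range]
  rw [if_pos hc]
  -- left side: read row c of the pass-2 result at position rows-1-r
  rw [pvOuter2, hlen1, if_pos hc, hR1c c hc]
  have hidx : matrix.length - 1 - r < ((List.range matrix.length).map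
      (fun k => pvVal matrix (matrix.length - 1 - k) c)).length := by simp; omega
  rw [List.getD_eq_getElem _ 0 (by simpa using hidx)]
  simp only [List.getElem_map, List.getElem_range]
  have hrr : matrix.length - 1 - (matrix.length - 1 - r) = r := by omega
  rw [hrr]
  -- the column max: reversing the column does not change it
  have hM : PySem.List.maxD (((List.range matrix.length).map
        (fun k => pvVal matrix (matrix.length - 1 - k) c)).filter (fun v => v ≠ -1))
        (fun x => x) 0 =
      PySem.List.maxD ((matrix.map (fun row => row.getD c 0)).filter (fun v => v ≠ -1))
        (fun x => x) 0 := by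
    rw [pvRowRev, List.filter_reverse, pvMaxD_reverse]
  rw [hM]
  -- right side: colMax[c] and matrix[r][c]
  have hcm : (((List.range (matrix.headD []).length).map (fun j =>
        PySem.List.maxD ((matrix.map (fun row => row.getD j 0)).filter (fun v => v ≠ -1))
          (fun x => x) 0)).getD c 0)
      = PySem.List.maxD ((matrix.map (fun row => row.getD c 0)).filter (fun v => v ≠ -1))
          (fun x => x) 0 := by
    rw [List.getD_eq_getElem _ 0 (by simpa using hc)]
    simp only [List.getElem_map, List.getElem_range]
  rw [hcm]
  simp only [pvVal]
  rw [List.getD_eq_getElem matrix [] hr]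

-- ===== VERDICT (by name: the statement is the Claim_ definition above) =====
theorem modifiedMatrix_spec : Claim_equal_modifiedMatrix := by
  intro matrix _ _
  exact modifiedMatrix_eq_alt matrix
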